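-- pv_equiv track=rewrite | github.com/Evndrz2000/Projetos-PEC | Semana 16/Sem-16-T1-Q1 Maior e menor elemento em matriz quadrada.py | maior_e_menor
-- ===== SOURCE A (Python) =====
-- def maior_e_menor(matriz):
--     maior = float('-inf')
--     menor = float('inf')
--     posicao_menor = (0, 0)
--     posicao_maior = (0, 0)
--     for linha in range(len(matriz)):
--         for coluna in range(len(matriz[linha])):
--             if matriz[linha][coluna] < menor:
--                 menor = matriz[linha][coluna]
--                 posicao_menor = (linha, coluna)
--             if matriz[linha][coluna] > maior:
--                 maior = matriz[linha][coluna]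
--                 posicao_maior = (linha, coluna)
--     return f'{posicao_maior}\n{posicao_menor}'
-- ===== SOURCE B (Python) =====
-- def maior_e_menor(matriz):
--     itens = [((i, j), v) for i, linha in enumerate(matriz) for j, v in enumerate(linha)]
--     if itens:
--         posicao_maior = max(itens, key=lambda t: t[1])[0]
--         posicao_menor = min(itens, key=lambda t: t[1])[0]
--     else:
--         posicao_maior = posicao_menor = (0, 0)
--     return f'{posicao_maior}\n{posicao_menor}'
-- ===== Notes on version B (the rewrite author's own statement) =====
-- stated objective: idiomatic
-- what changed: Replaced the hand-rolled nested index loop with four running state variables by flattening the matrix into an indexed item list and taking max/min with a key (first extremal element matches A's earliest-wins tie-breaking), with an explicit (0, 0) default for the empty case.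
import Mathlib
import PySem

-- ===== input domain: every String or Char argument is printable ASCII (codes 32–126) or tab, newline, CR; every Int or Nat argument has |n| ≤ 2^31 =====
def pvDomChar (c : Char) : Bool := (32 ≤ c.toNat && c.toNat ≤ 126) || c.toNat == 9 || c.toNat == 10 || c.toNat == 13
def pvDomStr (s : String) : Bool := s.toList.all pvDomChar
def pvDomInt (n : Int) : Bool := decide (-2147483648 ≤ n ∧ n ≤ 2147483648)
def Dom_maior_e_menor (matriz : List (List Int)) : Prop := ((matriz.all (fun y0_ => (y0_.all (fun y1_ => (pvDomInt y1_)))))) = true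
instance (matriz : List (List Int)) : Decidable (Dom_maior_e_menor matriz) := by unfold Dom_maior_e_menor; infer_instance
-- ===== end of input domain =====

-- B replaces A's nested index loop (four running variables, ±inf sentinels) by an indexed
-- flat item list and first-extremal max/min with a key: idiomatic, same asymptotic cost (not faster).

-- ===== PORT A =====
-- Python's float('-inf')/float('inf') sentinels are modeled as (none : Option Int):
-- every Int is > -inf and < +inf, which is exactly 'none ⇒ true' below (exact on Int inputs).
def pvLtMenor (v : Int) (menor : Option Int) : Bool :=
  match menor with | none => true | some m => decide (v < m)

def pvGtMaior (v : Int) (maior : Option Int) : Bool :=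
  match maior with | none => true | some m => decide (m < v)

-- repr of a Python int pair, as an f-string renders it: "(i, j)"
def pvFmtPair (p : Int × Int) : String :=
  "(" ++ PySem.Int.toStr p.1 ++ ", " ++ PySem.Int.toStr p.2 ++ ")"

-- state = (maior, menor, posicao_maior, posicao_menor)
def pvStateA : Type := Option Int × Option Int × (Int × Int) × (Int × Int)

def maior_e_menor (matriz : List (List Int)) : String :=
  let st :=
    (PySem.List.pyRange 0 (matriz.length) 1).foldl
      (fun (st : pvStateA) linha =>
        let row := PySem.List.pyGetD matriz linha []
        (PySem.List.pyRange 0 (row.length) 1).foldl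
          (fun (st : pvStateA) coluna =>
            let v := PySem.List.pyGetD row coluna 0
            let st1 := if pvLtMenor v st.2.1 then (st.1, some v, st.2.2.1, (linha, coluna)) else st
            if pvGtMaior v st1.1 then (some v, st1.2.1, (linha, coluna), st1.2.2.2) else st1)
          st)
      ((none, none, (0, 0), (0, 0)) : pvStateA)
  pvFmtPair st.2.2.1 ++ "\n" ++ pvFmtPair st.2.2.2

-- ===== PORT B =====
def maior_e_menor_alt (matriz : List (List Int)) : String :=
  let itens := (PySem.List.enumerate matriz).flatMap
    (fun p => (PySem.List.enumerate p.2).map (fun q => ((p.1, q.1), q.2)))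
  let posicao_maior :=
    match PySem.List.max? itens (fun t => t.2) with
    | none => ((0 : Int), (0 : Int))
    | some t => t.1
  let posicao_menor :=
    match PySem.List.min? itens (fun t => t.2) with
    | none => ((0 : Int), (0 : Int))
    | some t => t.1
  pvFmtPair posicao_maior ++ "\n" ++ pvFmtPair posicao_menor

-- ===== PRECONDITION & SPEC =====
def Spec_maior_e_menor (matriz : List (List Int)) (out : String) : Prop := out = maior_e_menor_alt matriz
instance (matriz : List (List Int)) (out : String) : Decidable (Spec_maior_e_menor matriz out) := by unfold Spec_maior_e_menor; infer_instance

-- ===== CLAIM (what is proved, stated in full; the proofs are below) =====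
def Claim_equal_maior_e_menor : Prop := ∀ (matriz : List (List Int)), Dom_maior_e_menor matriz → Spec_maior_e_menor matriz (maior_e_menor matriz)

-- ===== LEMMAS AND PROOFS =====

-- A's inner-loop step, written over one flattened item ((i, j), v)
def pvStepA (st : pvStateA) (it : (Int × Int) × Int) : pvStateA :=
  let st1 := if pvLtMenor it.2 st.2.1 then (st.1, some it.2, st.2.2.1, it.1) else st
  if pvGtMaior it.2 st1.1 then (some it.2, st1.2.1, it.1, st1.2.2.2) else st1

-- reconstruct A's state from the two max?/min? accumulators
def pvOfAcc (aM am : Option ((Int × Int) × Int)) : pvStateA :=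
  ((aM.map (·.2)), (am.map (·.2)),
   (match aM with | none => ((0:Int),(0:Int)) | some t => t.1),
   (match am with | none => ((0:Int),(0:Int)) | some t => t.1))

theorem pvStepA_ofAcc (aM am : Option ((Int × Int) × Int)) (it : (Int × Int) × Int) :
    pvStepA (pvOfAcc aM am) it =
      pvOfAcc
        (match aM with
         | none => some it
         | some m => if m.2 < it.2 then some it else some m)
        (match am with
         | none => some it
         | some m => if it.2 < m.2 then some it else some m) := by
  cases aM with
  | none =>
      cases am with
      | none => simp [pvStepA, pvOfAcc, pvLtMenor, pvGtMaior]
      | some m =>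
          simp only [pvStepA, pvOfAcc, pvLtMenor, pvGtMaior, Option.map]
          split_ifs <;> simp_all
  | some M =>
      cases am with
      | none =>
          simp only [pvStepA, pvOfAcc, pvLtMenor, pvGtMaior, Option.map]
          split_ifs <;> simp_all
      | some m =>
          simp only [pvStepA, pvOfAcc, pvLtMenor, pvGtMaior, Option.map]
          split_ifs <;> simp_all

theorem pvFoldA_eq (l : List ((Int × Int) × Int)) (aM am : Option ((Int × Int) × Int)) :
    l.foldl pvStepA (pvOfAcc aM am) =
      pvOfAcc
        (l.foldl (fun acc x => match acc with
            | none => some x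
            | some m => if m.2 < x.2 then some x else some m) aM)
        (l.foldl (fun acc x => match acc with
            | none => some x
            | some m => if x.2 < m.2 then some x else some m) am) := by
  induction l generalizing aM am with
  | nil => rfl
  | cons h t ih => simp only [List.foldl_cons, pvStepA_ofAcc, ih]

theorem pvFoldl_flatMap {α β σ : Type} (g : α → List β) (f : σ → β → σ)
    (l : List α) (init : σ) :
    (l.flatMap g).foldl f init = l.foldl (fun s a => (g a).foldl f s) init := by
  induction l generalizing init with
  | nil => rfl
  | cons h t ih => simp [List.flatMap_cons, List.foldl_append, ih]

-- one row of A's index loop equals the pvStepA-fold over that row's flattened items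
theorem pvRow_eq (linha : Int) (row : List Int) (st : pvStateA) :
    (PySem.List.pyRange 0 (row.length) 1).foldl
      (fun (st : pvStateA) coluna =>
        let v := PySem.List.pyGetD row coluna 0
        let st1 := if pvLtMenor v st.2.1 then (st.1, some v, st.2.2.1, (linha, coluna)) else st
        if pvGtMaior v st1.1 then (some v, st1.2.1, (linha, coluna), st1.2.2.2) else st1)
      st
    = ((PySem.List.enumerate row).map (fun q => ((linha, q.1), q.2))).foldl pvStepA st := by
  rw [PySem.List.enumerate_eq_map_pyRange (d := (0 : Int)), List.foldl_map, List.foldl_map]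
  congr 1

-- A's nested index loop equals the fold of pvStepA over B's flattened item list
theorem pvA_nested_eq_items (matriz : List (List Int)) (init : pvStateA) :
    (PySem.List.pyRange 0 (matriz.length) 1).foldl
      (fun (st : pvStateA) linha =>
        let row := PySem.List.pyGetD matriz linha []
        (PySem.List.pyRange 0 (row.length) 1).foldl
          (fun (st : pvStateA) coluna =>
            let v := PySem.List.pyGetD row coluna 0
            let st1 := if pvLtMenor v st.2.1 then (st.1, some v, st.2.2.1, (linha, coluna)) else st
            if pvGtMaior v st1.1 then (some v, st1.2.1, (linha, coluna), st1.2.2.2) else st1)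
          st)
      init
    = ((PySem.List.enumerate matriz).flatMap
        (fun p => (PySem.List.enumerate p.2).map (fun q => ((p.1, q.1), q.2)))).foldl
        pvStepA init := by
  rw [pvFoldl_flatMap]
  rw [PySem.List.enumerate_eq_map_pyRange (d := ([] : List Int)), List.foldl_map]
  simp only [pvRow_eq]
  congr 1

theorem pvMax?_eq_foldl (l : List ((Int × Int) × Int)) :
    PySem.List.max? l (fun t => t.2) =
      l.foldl (fun acc x => match acc with
        | none => some x
        | some m => if m.2 < x.2 then some x else some m) none := by
  unfold PySem.List.max?
  congr 1
  funext acc x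
  cases acc <;> rfl

theorem pvMin?_eq_foldl (l : List ((Int × Int) × Int)) :
    PySem.List.min? l (fun t => t.2) =
      l.foldl (fun acc x => match acc with
        | none => some x
        | some m => if x.2 < m.2 then some x else some m) none := by
  unfold PySem.List.min?
  congr 1
  funext acc x
  cases acc <;> rfl

-- ===== VERDICT (by name: the statement is the Claim_ definition above) =====
theorem maior_e_menor_spec : Claim_equal_maior_e_menor := by
  intro matriz _
  unfold Spec_maior_e_menor maior_e_menor maior_e_menor_alt
  simp only []
  rw [pvA_nested_eq_items]
  have h := pvFoldA_eq
    ((PySem.List.enumerate matriz).flatMap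
      (fun p => (PySem.List.enumerate p.2).map (fun q => ((p.1, q.1), q.2))))
    none none
  simp only [pvOfAcc, Option.map_none] at h
  rw [h, pvMax?_eq_foldl, pvMin?_eq_foldl]
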